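-- pv_equiv track=rewrite | github.com/ditengm/MetricsEvalContent | modules/.ipynb_checkpoints/geval-checkpoint.py | find_tokens
-- ===== SOURCE A (Python) =====
-- def find_tokens(generated_tokens: list, score_tokens: list):
--     """
--     Находит индексы токенов из списка score_tokens в списке generated_tokens.
--
--     Аргументы:
--         generated_tokens (list): Список идентификаторов сгенерированных токенов.
--         score_tokens (list): Список идентификаторов токенов оценок.
--
--     Возвращает:
--         list: Список индексов токенов оценок в сгенерированном тексте.
--     """
--
--     indexies = []
--     for i in range(len(generated_tokens)):
--         id_token = generated_tokens[i]
--         for id_score_token in score_tokens: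
--             if id_token == id_score_token:
--                 indexies.append(i)
--     return indexies
-- ===== SOURCE B (Python) =====
-- def find_tokens(generated_tokens, score_tokens):
--     positions = {}
--     for i, tok in enumerate(generated_tokens):
--         positions.setdefault(tok, []).append(i)
--     indexies = []
--     for tok in score_tokens:
--         indexies.extend(positions.get(tok, []))
--     indexies.sort()
--     return indexies
-- ===== Notes on version B (the rewrite author's own statement) =====
-- stated objective: alternative
-- what changed: Builds an inverted index mapping each token to its list of positions in one pass over generated_tokens, then drives the output from score_tokens by table lookups and restores ascending order with a final sort, replacing A's nested scan of score_tokens for every generated token.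
import Mathlib
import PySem

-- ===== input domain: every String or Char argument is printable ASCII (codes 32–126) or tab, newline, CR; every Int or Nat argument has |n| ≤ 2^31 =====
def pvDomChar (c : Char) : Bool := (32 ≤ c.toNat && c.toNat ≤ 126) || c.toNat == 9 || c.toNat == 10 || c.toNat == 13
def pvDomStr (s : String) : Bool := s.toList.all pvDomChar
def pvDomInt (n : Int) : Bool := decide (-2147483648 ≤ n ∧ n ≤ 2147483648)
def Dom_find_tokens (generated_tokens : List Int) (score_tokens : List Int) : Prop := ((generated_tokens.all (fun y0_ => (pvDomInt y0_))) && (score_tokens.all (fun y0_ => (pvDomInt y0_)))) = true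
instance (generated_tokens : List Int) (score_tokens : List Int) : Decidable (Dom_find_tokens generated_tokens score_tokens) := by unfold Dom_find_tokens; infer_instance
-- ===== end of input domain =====

-- B builds an inverted index (token -> positions) from generated_tokens once, then drives the
-- output from score_tokens via lookups and a final sort, instead of A's nested scan.


-- ===== PORT A =====
def find_tokens (generated_tokens : List Int) (score_tokens : List Int) : List Int :=
  (PySem.List.pyRange 0 (generated_tokens.length : Int) 1).foldl
    (fun indexies i =>
      let id_token := PySem.List.pyGetD generated_tokens i 0
      score_tokens.foldl
        (fun acc id_score_token =>
          if id_token = id_score_token then acc ++ [i] else acc)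
        indexies)
    []

-- ===== PORT B =====
def find_tokens_alt (generated_tokens : List Int) (score_tokens : List Int) : List Int :=
  let positions : PySem.Dict Int (List Int) :=
    (PySem.List.enumerate generated_tokens).foldl
      (fun d p => d.insert p.2 (d.getD p.2 [] ++ [p.1])) PySem.Dict.empty
  let indexies :=
    score_tokens.foldl (fun acc tok => acc ++ positions.getD tok []) []
  PySem.List.sorted indexies (fun x => x) false

-- ===== PRECONDITION & SPEC =====
def Spec_find_tokens (generated_tokens : List Int) (score_tokens : List Int) (out : List Int) : Prop := out = find_tokens_alt generated_tokens score_tokens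
instance (generated_tokens : List Int) (score_tokens : List Int) (out : List Int) : Decidable (Spec_find_tokens generated_tokens score_tokens out) := by unfold Spec_find_tokens; infer_instance

-- ===== CLAIM (what is proved, stated in full; the proofs are below) =====
def Claim_equal_find_tokens : Prop := ∀ (generated_tokens : List Int) (score_tokens : List Int), Dom_find_tokens generated_tokens score_tokens → Spec_find_tokens generated_tokens score_tokens (find_tokens generated_tokens score_tokens)

-- ===== LEMMAS AND PROOFS =====

-- A's loop, generalized: each index i appends once per match of g[i] in score_tokens.
theorem A_loop (g s : List Int) (l : List Int) (acc : List Int) :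
    l.foldl (fun indexies i =>
        s.foldl (fun acc2 t => if PySem.List.pyGetD g i 0 = t then acc2 ++ [i] else acc2) indexies) acc
      = acc ++ l.flatMap (fun i =>
          (s.filter (fun t => decide (PySem.List.pyGetD g i 0 = t))).map (fun _ => i)) := by
  induction l generalizing acc with
  | nil => simp
  | cons i l ih =>
    rw [List.foldl_cons,
        PySem.List.foldl_append_ite (p := fun t => PySem.List.pyGetD g i 0 = t)
          (f := fun _ => i) (l := s) (acc := acc),
        ih, List.flatMap_cons, List.append_assoc]

-- A unfolded: for each enumerated position p, append p.1 once per match in score_tokens.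
theorem find_tokens_eq_flatMap (g s : List Int) :
    find_tokens g s
      = (PySem.List.enumerate g).flatMap
          (fun p => (s.filter (fun t => decide (p.2 = t))).map (fun _ => p.1)) := by
  unfold find_tokens
  show (PySem.List.pyRange 0 (g.length : Int) 1).foldl
      (fun indexies i =>
        s.foldl (fun acc2 t => if PySem.List.pyGetD g i 0 = t then acc2 ++ [i] else acc2) indexies)
      [] = _
  rw [A_loop, List.nil_append, PySem.List.enumerate_eq_map_pyRange (d := 0), List.flatMap_map]
  rfl

-- The inverted index: its entry for t is the ascending list of positions of t.
theorem getD_build (ps : List (Int × Int)) (d : PySem.Dict Int (List Int)) (t : Int) :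
    ((ps.foldl (fun d p => d.insert p.2 (d.getD p.2 [] ++ [p.1])) d).getD t [])
      = d.getD t [] ++ (ps.filter (fun p => decide (p.2 = t))).map Prod.fst := by
  induction ps generalizing d with
  | nil => simp
  | cons p ps ih =>
    simp only [List.foldl_cons, ih, List.filter_cons]
    by_cases h : p.2 = t
    · subst h
      simp [PySem.Dict.getD_insert_self]
    · rw [PySem.Dict.getD_insert_of_ne]
      · simp [h]
      · exact fun hh => h hh.symm

-- B's pre-sort accumulator, unfolded to a flatMap over score_tokens.
theorem alt_pre_sort (g s : List Int) :
    find_tokens_alt g s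
      = PySem.List.sorted
          (s.flatMap (fun t =>
            ((PySem.List.enumerate g).filter (fun p => decide (p.2 = t))).map Prod.fst))
          (fun x => x) false := by
  unfold find_tokens_alt
  show PySem.List.sorted
      (s.foldl (fun acc tok => acc ++
        ((PySem.List.enumerate g).foldl
          (fun d p => d.insert p.2 (d.getD p.2 [] ++ [p.1])) PySem.Dict.empty).getD tok []) [])
      (fun x => x) false = _
  rw [PySem.List.foldl_append_eq_flatMap, List.nil_append]
  congr 1
  congr 1
  funext t
  rw [getD_build]
  simp [PySem.Dict.empty, PySem.Dict.getD, PySem.Dict.get?]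

-- filter-then-map equals flatMap of an if, on both sides (to expose the transpose).
theorem filter_map_eq_flatMap {α : Type} (l : List α) (p : α → Prop) [DecidablePred p]
    (v : Int) :
    (l.filter (fun x => decide (p x))).map (fun _ => v)
      = l.flatMap (fun x => if p x then [v] else []) := by
  induction l with
  | nil => rfl
  | cons x xs ih =>
    by_cases h : p x <;> simp [h, ih]

theorem filter_map_fst_eq_flatMap (l : List (Int × Int)) (t : Int) :
    (l.filter (fun p => decide (p.2 = t))).map Prod.fst
      = l.flatMap (fun p => if p.2 = t then [p.1] else []) := by
  induction l with
  | nil => rfl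
  | cons x xs ih =>
    by_cases h : x.2 = t <;> simp [h, ih]

-- Exchanging the two flatMaps is a permutation (multiset bind is commutative).
theorem flatMap_comm_perm {α β : Type} (xs : List α) (ys : List β)
    (f : α → β → List Int) :
    (xs.flatMap (fun x => ys.flatMap (fun y => f x y))).Perm
      (ys.flatMap (fun y => xs.flatMap (fun x => f x y))) := by
  have : ((xs.flatMap (fun x => ys.flatMap (fun y => f x y)) : List Int) : Multiset Int)
      = ((ys.flatMap (fun y => xs.flatMap (fun x => f x y)) : List Int) : Multiset Int) := by
    rw [← Multiset.coe_bind, ← Multiset.coe_bind]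
    simp only [← Multiset.coe_bind]
    exact Multiset.bind_bind (↑xs : Multiset α) (↑ys : Multiset β)
  exact Multiset.coe_eq_coe.mp this

-- A's output is sorted: blocks of equal indices, indices strictly increasing across blocks.
theorem pairwise_le_flatMap (ps : List (Int × Int)) (f : Int × Int → List Int)
    (hps : ps.Pairwise fun p q => p.1 < q.1)
    (hf : ∀ p x, x ∈ f p → x = p.1) :
    (ps.flatMap f).Pairwise (· ≤ ·) := by
  induction ps with
  | nil => simp
  | cons p ps ih =>
    rcases List.pairwise_cons.mp hps with ⟨hhead, htail⟩
    rw [List.flatMap_cons, List.pairwise_append]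
    refine ⟨?_, ih htail, ?_⟩
    · apply List.pairwise_of_forall_mem_list
      intro a ha b hb
      rw [hf p a ha, hf p b hb]
    · intro a ha b hb
      rcases List.mem_flatMap.mp hb with ⟨q, hq, hbq⟩
      rw [hf p a ha, hf q b hbq]
      exact le_of_lt (hhead q hq)

-- ===== VERDICT (by name: the statement is the Claim_ definition above) =====
theorem find_tokens_spec : Claim_equal_find_tokens := by
  intro g s _
  unfold Spec_find_tokens
  rw [alt_pre_sort, find_tokens_eq_flatMap]
  have hA : (PySem.List.enumerate g).flatMap
      (fun p => (s.filter (fun t => decide (p.2 = t))).map (fun _ => p.1))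
    = (PySem.List.enumerate g).flatMap
      (fun p => s.flatMap (fun t => if p.2 = t then [p.1] else [])) := by
    congr 1
    funext p
    exact filter_map_eq_flatMap s (fun t => p.2 = t) p.1
  have hB : (s.flatMap (fun t =>
      ((PySem.List.enumerate g).filter (fun p => decide (p.2 = t))).map Prod.fst))
    = s.flatMap (fun t =>
      (PySem.List.enumerate g).flatMap (fun p => if p.2 = t then [p.1] else [])) := by
    congr 1
    funext t
    exact filter_map_fst_eq_flatMap (PySem.List.enumerate g) t
  rw [hA, hB]
  apply Eq.symm
  apply PySem.List.sorted_id_eq_of_perm_of_pairwise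
  · exact flatMap_comm_perm (PySem.List.enumerate g) s
      (fun p t => if p.2 = t then [p.1] else [])
  · apply pairwise_le_flatMap _ _ (PySem.List.pairwise_lt_enumerate g 0)
    intro p x hx
    rcases List.mem_flatMap.mp hx with ⟨t, _, hxt⟩
    by_cases h : p.2 = t
    · simpa [h] using hxt
    · simp [h] at hxt
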